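-- pv_equiv track=rewrite | github.com/nico-espinosadice/abductive-theory | similarityfunctions.py | calculate_union_2
-- ===== SOURCE A (Python) =====
-- def calculate_union_2(graph, children_a, children_b):
--     union = 0
--     for i in children_a:
--         if i in children_b:
--             union += abs(children_a[i] - children_b[i])
--         else:
--             union += children_a[i]
--     for i in children_b:
--         if not i in children_a:
--             union += children_b[i]
--     return union
-- ===== SOURCE B (Python) =====
-- def calculate_union_2(graph, children_a, children_b):
--     # |a-b| = a + b - 2*min(a, b), so: total of all values of both dicts,
--     # corrected by -2*min(a[k], b[k]) for each shared key.
--     total = sum(children_a.values()) + sum(children_b.values())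
--     for k, v in children_b.items():
--         if k in children_a:
--             total -= 2 * min(children_a[k], v)
--     return total
-- ===== Notes on version B (the rewrite author's own statement) =====
-- stated objective: alternative
-- what changed: B uses the identity |a-b| = a+b-2*min(a,b): it sums ALL values of both dicts up front and then makes one corrective pass subtracting 2*min(a[k],b[k]) on shared keys, instead of A's two loops that case-split every key into matched/unmatched and take absolute differences.
import Mathlib
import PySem

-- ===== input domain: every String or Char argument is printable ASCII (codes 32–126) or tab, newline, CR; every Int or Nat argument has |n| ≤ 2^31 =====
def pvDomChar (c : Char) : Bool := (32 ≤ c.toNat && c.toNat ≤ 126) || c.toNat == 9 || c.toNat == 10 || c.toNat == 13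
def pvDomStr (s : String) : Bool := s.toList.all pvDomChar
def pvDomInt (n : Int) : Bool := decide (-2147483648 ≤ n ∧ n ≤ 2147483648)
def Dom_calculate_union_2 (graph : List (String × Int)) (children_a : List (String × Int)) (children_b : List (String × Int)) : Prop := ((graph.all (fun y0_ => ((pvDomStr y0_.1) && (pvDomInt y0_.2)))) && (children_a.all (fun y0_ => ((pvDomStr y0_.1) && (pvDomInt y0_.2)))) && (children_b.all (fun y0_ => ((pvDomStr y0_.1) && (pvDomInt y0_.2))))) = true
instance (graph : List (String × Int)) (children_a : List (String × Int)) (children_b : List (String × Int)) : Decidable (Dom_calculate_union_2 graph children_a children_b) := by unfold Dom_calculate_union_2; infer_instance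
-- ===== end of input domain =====

-- B replaces A's per-key case analysis by the identity |a-b| = a+b-2*min(a,b): it sums all
-- values of both dicts, then one corrective pass subtracts 2*min on shared keys; objective: alternative.


-- ===== PORT A =====
-- the dict arguments arrive as association lists; Dict.ofList is exactly dict(pairs)
-- (children_a[i] is ported as getD i 0: i always ranges over the dict's own keys, so no KeyError arises)
def calculate_union_2 (graph : List (String × Int)) (children_a : List (String × Int)) (children_b : List (String × Int)) : Int :=
  let da := PySem.Dict.ofList children_a
  let db := PySem.Dict.ofList children_b
  let union : Int := 0
  let union := da.keys.foldl (fun union i =>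
    if db.contains i then union + |da.getD i 0 - db.getD i 0| else union + da.getD i 0) union
  let union := db.keys.foldl (fun union i =>
    if !da.contains i then union + db.getD i 0 else union) union
  union

-- ===== PORT B =====
def calculate_union_2_alt (graph : List (String × Int)) (children_a : List (String × Int)) (children_b : List (String × Int)) : Int :=
  let da := PySem.Dict.ofList children_a
  let db := PySem.Dict.ofList children_b
  let total := da.values.sum + db.values.sum
  db.items.foldl (fun total kv =>
    if da.contains kv.1 then total - 2 * min (da.getD kv.1 0) kv.2 else total) total

-- ===== PRECONDITION & SPEC =====
def Spec_calculate_union_2 (graph : List (String × Int)) (children_a : List (String × Int)) (children_b : List (String × Int)) (out : Int) : Prop := out = calculate_union_2_alt graph children_a children_b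
instance (graph : List (String × Int)) (children_a : List (String × Int)) (children_b : List (String × Int)) (out : Int) : Decidable (Spec_calculate_union_2 graph children_a children_b out) := by unfold Spec_calculate_union_2; infer_instance

-- ===== CLAIM (what is proved, stated in full; the proofs are below) =====
def Claim_equal_calculate_union_2 : Prop := ∀ (graph : List (String × Int)) (children_a : List (String × Int)) (children_b : List (String × Int)), Dom_calculate_union_2 graph children_a children_b → Spec_calculate_union_2 graph children_a children_b (calculate_union_2 graph children_a children_b)

-- ===== LEMMAS AND PROOFS =====

-- A's first loop: an if/else-conditional accumulating fold is the sum over the two filters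
theorem foldl_ite_add_split {α : Type} (p : α → Bool) (g1 g2 : α → Int) :
    ∀ (l : List α) (acc : Int),
      l.foldl (fun u i => if p i then u + g1 i else u + g2 i) acc
        = acc + ((l.filter p).map g1).sum + ((l.filter (fun x => !p x)).map g2).sum := by
  intro l
  induction l with
  | nil => simp
  | cons x xs ih =>
    intro acc
    by_cases h : p x = true <;> simp [h, ih] <;> ring

-- B's corrective loop: a guarded subtracting fold subtracts the sum over the filter
theorem foldl_if_sub_eq_sum_filter {α : Type} (p : α → Bool) (g : α → Int) :
    ∀ (l : List α) (acc : Int),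
      l.foldl (fun u i => if p i then u - g i else u) acc
        = acc - ((l.filter p).map g).sum := by
  intro l
  induction l with
  | nil => simp
  | cons x xs ih =>
    intro acc
    by_cases h : p x = true <;> simp [h, ih]
    ring

-- A's second loop: a guarded accumulating fold is the sum over the filter
theorem foldl_if_add_eq_sum_filter {α : Type} (p : α → Bool) (g : α → Int) :
    ∀ (l : List α) (acc : Int),
      l.foldl (fun u i => if p i then u + g i else u) acc
        = acc + ((l.filter p).map g).sum := by
  intro l
  induction l with
  | nil => simp
  | cons x xs ih =>
    intro acc
    by_cases h : p x = true <;> simp [h, ih]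
    ring

-- splitting a mapped sum along a predicate
theorem sum_map_filter_split {α : Type} (p : α → Bool) (g : α → Int) :
    ∀ (l : List α),
      (l.map g).sum
        = ((l.filter p).map g).sum + ((l.filter (fun x => !p x)).map g).sum := by
  intro l
  induction l with
  | nil => simp
  | cons x xs ih =>
    by_cases h : p x = true <;> simp [h, ih] <;> ring

-- the arithmetic core: |x-y| = x + y - 2*min(x,y), summed over one list
theorem sum_abs_sub_eq {α : Type} (x y : α → Int) :
    ∀ (l : List α),
      (l.map (fun k => |x k - y k|)).sum
        = (l.map x).sum + (l.map y).sum - (l.map (fun k => 2 * min (x k) (y k))).sum := by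
  intro l
  induction l with
  | nil => simp
  | cons a as ih =>
    have h : |x a - y a| = x a + y a - 2 * min (x a) (y a) := by
      rcases le_total (x a) (y a) with h' | h'
      · rw [abs_of_nonpos (by omega), min_eq_left h']; ring
      · rw [abs_of_nonneg (by omega), min_eq_right h']; ring
    simp [ih, h]; ring

-- ===== VERDICT (by name: the statement is the Claim_ definition above) =====
theorem calculate_union_2_spec : Claim_equal_calculate_union_2 := by
  intro graph ca cb _
  unfold Spec_calculate_union_2 calculate_union_2 calculate_union_2_alt
  simp only []
  set da := PySem.Dict.ofList ca with hda
  set db := PySem.Dict.ofList cb with hdb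
  have hnda : da.keys.Nodup := PySem.Dict.nodup_keys_ofList ca
  have hndb : db.keys.Nodup := PySem.Dict.nodup_keys_ofList cb
  -- B side: items as keys, fold as a guarded sum
  rw [PySem.Dict.items_eq_map_keys db hndb 0, List.foldl_map]
  rw [foldl_if_sub_eq_sum_filter, foldl_if_add_eq_sum_filter, foldl_ite_add_split]
  -- values as sums over keys
  rw [PySem.Dict.values_eq_map_keys da hnda 0, PySem.Dict.values_eq_map_keys db hndb 0]
  -- split both value sums along membership in the other dict
  rw [sum_map_filter_split (fun k => db.contains k) (fun k => da.getD k 0) da.keys,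
      sum_map_filter_split (fun k => da.contains k) (fun k => db.getD k 0) db.keys]
  -- the two intersection key lists are permutations of each other
  have hperm : List.Perm (da.keys.filter (fun k => db.contains k)) (db.keys.filter (fun k => da.contains k)) := by
    rw [List.perm_ext_iff_of_nodup (hnda.filter _) (hndb.filter _)]
    intro k
    simp only [List.mem_filter, PySem.Dict.contains_iff_mem_keys]
    tauto
  have habs :
      ((da.keys.filter (fun k => db.contains k)).map
          (fun k => |da.getD k 0 - db.getD k 0|)).sum
        = ((db.keys.filter (fun k => da.contains k)).map
            (fun k => |da.getD k 0 - db.getD k 0|)).sum :=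
    (hperm.map _).sum_eq
  have ha :
      ((da.keys.filter (fun k => db.contains k)).map (fun k => da.getD k 0)).sum
        = ((db.keys.filter (fun k => da.contains k)).map (fun k => da.getD k 0)).sum :=
    (hperm.map _).sum_eq
  rw [habs, ha, sum_abs_sub_eq (fun k => da.getD k 0) (fun k => db.getD k 0)]
  ring
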